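-- pv_equiv track=rewrite | github.com/grandissant/programmers | programmers_empty_cash.py | solution
-- ===== SOURCE A (Python) =====
-- def solution(price,count,money):
--     cost = 0
--
--     #use = price * count #이용료 구하기
--
--     for i in range(1, count + 1):
--         cost += price * i # 이용금액을 계산하여 이용료를 합한다
--
--     change = money - cost #잔돈 계산
--
--     # 금액이 모자라면 모자란 값을 return 또는 금액이 부족하지 않으면 0을 return
--     if change < 0:
--         return -change
--     else:
--         return 0
-- ===== SOURCE B (Python) =====
-- def solution(price, count, money):
--     n = count if count > 0 else 0
--     cost = price * n * (n + 1) // 2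
--     return max(0, cost - money)
-- ===== Notes on version B (the rewrite author's own statement) =====
-- stated objective: faster
-- what changed: Replaces the O(count) loop summing price*i with the closed-form triangular sum price*n*(n+1)//2 and a max() for the shortfall.
import Mathlib
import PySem

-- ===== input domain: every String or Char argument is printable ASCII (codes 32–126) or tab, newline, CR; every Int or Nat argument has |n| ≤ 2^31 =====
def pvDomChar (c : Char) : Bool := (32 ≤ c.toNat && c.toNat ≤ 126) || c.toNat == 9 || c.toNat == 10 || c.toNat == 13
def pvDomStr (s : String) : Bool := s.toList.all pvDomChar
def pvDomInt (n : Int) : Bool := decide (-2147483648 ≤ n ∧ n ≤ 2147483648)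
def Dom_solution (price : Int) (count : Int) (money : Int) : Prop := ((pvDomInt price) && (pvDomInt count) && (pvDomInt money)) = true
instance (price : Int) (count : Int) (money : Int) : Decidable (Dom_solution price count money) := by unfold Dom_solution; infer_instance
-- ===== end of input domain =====

-- B replaces A's O(count) fee-summing loop with the closed-form triangular sum; return values only, no side effects.

-- ===== PORT A =====
def solution (price : Int) (count : Int) (money : Int) : Int :=
  let cost := (PySem.List.pyRange 1 (count + 1) 1).foldl (fun c i => c + price * i) 0
  let change := money - cost
  if change < 0 then -change else 0

-- ===== PORT B =====
def solution_alt (price : Int) (count : Int) (money : Int) : Int :=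
  let n := if count > 0 then count else 0
  let cost := PySem.Int.floordiv (price * n * (n + 1)) 2
  max 0 (cost - money)

-- ===== PRECONDITION & SPEC =====
def Spec_solution (price : Int) (count : Int) (money : Int) (out : Int) : Prop := out = solution_alt price count money
instance (price : Int) (count : Int) (money : Int) (out : Int) : Decidable (Spec_solution price count money out) := by unfold Spec_solution; infer_instance

-- ===== CLAIM (what is proved, stated in full; the proofs are below) =====
def Claim_equal_solution : Prop := ∀ (price : Int) (count : Int) (money : Int), Dom_solution price count money → Spec_solution price count money (solution price count money)

-- ===== LEMMAS AND PROOFS =====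

-- the loop sum doubled equals price*k*(k+1)
theorem pv_two_mul_fold (price : Int) : ∀ k : Nat,
    2 * ((PySem.List.pyRange 1 ((k : Int) + 1) 1).foldl (fun c i => c + price * i) 0)
      = price * k * (k + 1) := by
  intro k
  induction k with
  | zero => simp [PySem.List.pyRange_one_eq_nil]
  | succ k ih =>
    have hsplit : PySem.List.pyRange 1 (((k : Int) + 1) + 1) 1
        = PySem.List.pyRange 1 ((k : Int) + 1) 1 ++ [(k : Int) + 1] :=
      PySem.List.pyRange_one_succ_right (by omega)
    push_cast
    rw [hsplit, List.foldl_append]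
    simp only [List.foldl]
    nlinarith

theorem pv_fold_closed (price : Int) (count : Int) :
    (PySem.List.pyRange 1 (count + 1) 1).foldl (fun c i => c + price * i) 0
      = PySem.Int.floordiv (price * (if count > 0 then count else 0) * ((if count > 0 then count else 0) + 1)) 2 := by
  split_ifs with h
  · have hc : ((count.toNat : Int)) = count := by omega
    have h2 := pv_two_mul_fold price count.toNat
    rw [hc] at h2
    have heq : price * count * (count + 1)
        = 2 * ((PySem.List.pyRange 1 (count + 1) 1).foldl (fun c i => c + price * i) 0) := h2.symm
    rw [heq, PySem.Int.floordiv]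
    exact (Int.mul_fdiv_cancel_left _ (by norm_num : (2:Int) ≠ 0)).symm
  · rw [PySem.List.pyRange_one_eq_nil (by omega)]
    simp [PySem.Int.floordiv]

-- ===== VERDICT (by name: the statement is the Claim_ definition above) =====
theorem solution_spec : Claim_equal_solution := by
  intro price count money _
  unfold Spec_solution solution solution_alt
  dsimp only
  rw [pv_fold_closed]
  generalize PySem.Int.floordiv (price * (if count > 0 then count else 0) * ((if count > 0 then count else 0) + 1)) 2 = cost
  omega
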